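-- pv_equiv track=rewrite | github.com/RuthCohen3257/pythonProject | main2.py | calculate_payment
-- ===== SOURCE A (Python) =====
-- def calculate_payment(customers):
--     total_payment = 0
--     for num_customers in customers:
--         if num_customers % 8 == 0:
--             total_payment += 200 * (num_customers // 8)
--         else:
--             total_payment += 200 * (num_customers // 8) + 50
--
--     return total_payment
-- ===== SOURCE B (Python) =====
-- def calculate_payment(customers):
--     # 200*(n//8) + (50 if n%8 else 0) == 25*n + ADJUST[n % 8], since
--     # 200*(n//8) = 25*(n - n%8) and ADJUST[r] = 50 - 25*r for r > 0, 0 for r == 0.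
--     ADJUST = (0, 25, 0, -25, -50, -75, -100, -125)
--     return 25 * sum(customers) + sum(ADJUST[n % 8] for n in customers)
-- ===== Notes on version B (the rewrite author's own statement) =====
-- stated objective: alternative
-- what changed: Eliminates floor division entirely: uses the identity 200*(n//8) + (50 if n%8 else 0) = 25*n + ADJUST[n%8] with a precomputed 8-entry residue table, so B is 25*sum(customers) plus a table lookup per element.
import Mathlib
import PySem

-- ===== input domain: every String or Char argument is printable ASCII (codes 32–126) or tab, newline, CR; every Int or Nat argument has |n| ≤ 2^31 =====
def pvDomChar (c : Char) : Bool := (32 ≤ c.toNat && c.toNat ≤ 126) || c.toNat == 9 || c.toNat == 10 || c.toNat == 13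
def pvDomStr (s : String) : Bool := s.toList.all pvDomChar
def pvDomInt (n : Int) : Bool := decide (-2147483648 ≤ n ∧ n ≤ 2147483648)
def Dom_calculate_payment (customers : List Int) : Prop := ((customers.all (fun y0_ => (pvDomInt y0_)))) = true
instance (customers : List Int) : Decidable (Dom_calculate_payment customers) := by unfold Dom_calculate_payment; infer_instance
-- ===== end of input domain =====

-- B replaces the branch-and-floor-division accumulator with the arithmetic identity
-- 200*(n//8) + (50 if n%8 else 0) = 25*n + ADJUST[n%8] (an 8-entry residue table);
-- objective: alternative (same cost, no division, no branch).


-- ===== PORT A =====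
def calculate_payment (customers : List Int) : Int :=
  customers.foldl (fun total_payment num_customers =>
    if PySem.Int.mod num_customers 8 = 0 then
      total_payment + 200 * PySem.Int.floordiv num_customers 8
    else
      total_payment + (200 * PySem.Int.floordiv num_customers 8 + 50)) 0

-- ===== PORT B =====
-- ADJUST[n % 8]: the index is always in [0,8), so pyGet? never returns none; .getD 0 discharges the option.
def calculate_payment_alt (customers : List Int) : Int :=
  let adjust : List Int := [0, 25, 0, -25, -50, -75, -100, -125]
  25 * customers.sum +
    (customers.map (fun n => (PySem.List.pyGet? adjust (PySem.Int.mod n 8)).getD 0)).sum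

-- ===== PRECONDITION & SPEC =====
def Spec_calculate_payment (customers : List Int) (out : Int) : Prop := out = calculate_payment_alt customers
instance (customers : List Int) (out : Int) : Decidable (Spec_calculate_payment customers out) := by unfold Spec_calculate_payment; infer_instance

-- ===== CLAIM (what is proved, stated in full; the proofs are below) =====
def Claim_equal_calculate_payment : Prop := ∀ (customers : List Int), Dom_calculate_payment customers → Spec_calculate_payment customers (calculate_payment customers)

-- ===== LEMMAS AND PROOFS =====
theorem calculate_payment_elem (n : Int) :
    (if PySem.Int.mod n 8 = 0 then 200 * PySem.Int.floordiv n 8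
     else 200 * PySem.Int.floordiv n 8 + 50)
    = 25 * n + (PySem.List.pyGet? ([0, 25, 0, -25, -50, -75, -100, -125] : List Int)
        (PySem.Int.mod n 8)).getD 0 := by
  have hd : PySem.Int.floordiv n 8 * 8 + PySem.Int.mod n 8 = n :=
    PySem.Int.floordiv_mul_add_mod n 8
  have hm : PySem.Int.mod n 8 = n % 8 := PySem.Int.mod_eq_emod_of_pos (by omega)
  have h0 : 0 ≤ PySem.Int.mod n 8 := by rw [hm]; exact Int.emod_nonneg n (by omega)
  have h8 : PySem.Int.mod n 8 < 8 := by rw [hm]; exact Int.emod_lt_of_pos n (by omega)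
  set r := PySem.Int.mod n 8 with hr
  clear_value r
  interval_cases r <;>
    simp only [PySem.List.pyGet?, PySem.List.pyIdx?, show ((2:Int).toNat = 2) from rfl,
      show ((3:Int).toNat = 3) from rfl, show ((4:Int).toNat = 4) from rfl,
      show ((5:Int).toNat = 5) from rfl, show ((6:Int).toNat = 6) from rfl,
      show ((7:Int).toNat = 7) from rfl] <;> norm_num <;> omega

theorem calculate_payment_foldl (customers : List Int) (acc : Int) :
    customers.foldl (fun total_payment num_customers =>
      if PySem.Int.mod num_customers 8 = 0 then
        total_payment + 200 * PySem.Int.floordiv num_customers 8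
      else
        total_payment + (200 * PySem.Int.floordiv num_customers 8 + 50)) acc
    = acc + calculate_payment_alt customers := by
  induction customers generalizing acc with
  | nil => simp [calculate_payment_alt]
  | cons x xs ih =>
    rw [List.foldl_cons]
    by_cases h : PySem.Int.mod x 8 = 0
    · rw [if_pos h, ih]
      have := calculate_payment_elem x
      rw [if_pos h] at this
      simp only [calculate_payment_alt, List.map_cons, List.sum_cons]
      rw [this]; ring
    · rw [if_neg h, ih]
      have := calculate_payment_elem x
      rw [if_neg h] at this
      simp only [calculate_payment_alt, List.map_cons, List.sum_cons]
      rw [this]; ring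

-- ===== VERDICT (by name: the statement is the Claim_ definition above) =====
theorem calculate_payment_spec : Claim_equal_calculate_payment := by
  intro customers _
  show _ = _
  rw [calculate_payment, calculate_payment_foldl]
  ring
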